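-- pv_equiv track=rewrite | github.com/baptistecottier/advents-of-code | events/year_2023/day_14/day_14.py | tilt_n
-- ===== SOURCE A (Python) =====
-- def tilt_n(rounded: set[tuple[int, int]], cube: set[tuple[int, int]], h: int
--            ) -> set[tuple[int, int]]:
--     """
--     Tilts round objects downward within a grid until they hit a square or another tilted object.
--     """
--     tlt = set()
--     for x, y in rounded:
--
--         while (x, y) not in cube and y <= h:
--             y += 1
--         y -= 1
--
--         while (x, y) in tlt:
--             y -= 1
--         tlt.add((x, y))
--
--     return tlt
-- ===== SOURCE B (Python) =====
-- def tilt_n(rounded, cube, h):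
--     # Index cube positions by column once; per rock, the stop row is a closed-form
--     # min over that column, and the landing row comes from a union-find ("next free
--     # cell below") dictionary with path compression instead of re-scanning settled rocks.
--     cols = {}
--     for cx, cy in cube:
--         cols.setdefault(cx, []).append(cy)
--     parent = {}
--     tlt = set()
--     for x, y in rounded:
--         s = min([c for c in cols.get(x, []) if c >= y] + [max(y, h + 1)])
--         k = (x, s - 1)
--         path = []
--         while k in parent:
--             path.append(k)
--             k = parent[k]
--         for p in path:
--             parent[p] = k
--         t = k[1]
--         parent[(x, t)] = (x, t - 1)
--         tlt.add((x, t))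
--     return tlt
-- ===== Notes on version B (the rewrite author's own statement) =====
-- stated objective: faster
-- what changed: B indexes cube positions by column once and gets each rock's stop row as a closed-form min over its column instead of stepping row by row up to h, and finds the landing row with a path-compressed next-free-cell dictionary (union-find) instead of re-scanning the settled set cell by cell.
import Mathlib
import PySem

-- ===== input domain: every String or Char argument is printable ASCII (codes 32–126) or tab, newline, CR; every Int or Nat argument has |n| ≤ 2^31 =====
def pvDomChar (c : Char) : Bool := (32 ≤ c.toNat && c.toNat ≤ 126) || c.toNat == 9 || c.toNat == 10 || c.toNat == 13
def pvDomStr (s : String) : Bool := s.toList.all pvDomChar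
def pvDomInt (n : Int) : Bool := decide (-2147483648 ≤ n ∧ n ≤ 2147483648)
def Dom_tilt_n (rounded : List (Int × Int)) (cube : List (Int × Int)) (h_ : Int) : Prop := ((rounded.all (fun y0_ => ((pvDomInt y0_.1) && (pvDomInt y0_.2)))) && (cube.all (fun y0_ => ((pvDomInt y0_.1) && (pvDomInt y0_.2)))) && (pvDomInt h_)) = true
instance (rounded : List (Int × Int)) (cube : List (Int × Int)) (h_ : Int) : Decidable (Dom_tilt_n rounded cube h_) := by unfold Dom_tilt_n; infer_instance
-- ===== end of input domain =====

-- B replaces A's per-rock step-by-step scans by a per-column cube index with a closed-form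
-- min for the stop row and a path-compressed "next free cell" dictionary for the landing row.

-- termination helper for tiltSettle (cited by name in its decreasing_by)
theorem pvFilterLenLt {α : Type} {l : List α} {p q : α → Bool}
    (himp : ∀ a, q a = true → p a = true) (x : α) (hx : x ∈ l)
    (hp : p x = true) (hq : q x = false) :
    (l.filter q).length < (l.filter p).length := by
  have hfe : l.filter q = (l.filter p).filter q := by
    rw [List.filter_filter]
    apply List.filter_congr
    intro a _
    cases h : q a
    · simp
    · simp [himp a h]
  rw [hfe]
  exact List.length_filter_lt_length_iff_exists.mpr ⟨x, List.mem_filter.mpr ⟨hx, hp⟩, by simp [hq]⟩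

-- ===== PORT A =====
-- first while loop of A: y += 1 while (x, y) not in cube and y <= h
def tiltStop (cube : List (Int × Int)) (h_ : Int) (x : Int) (y : Int) : Int :=
  if (x, y) ∉ cube ∧ y ≤ h_ then tiltStop cube h_ x (y + 1) else y
termination_by (h_ + 1 - y).toNat
decreasing_by rename_i hcond; obtain ⟨-, hy⟩ := hcond; omega

-- second while loop of A: y -= 1 while (x, y) in tlt
def tiltSettle (tlt : List (Int × Int)) (x : Int) (y : Int) : Int :=
  if (x, y) ∈ tlt then tiltSettle tlt x (y - 1) else y
termination_by (tlt.filter (fun p => decide (p.1 = x ∧ p.2 ≤ y))).length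
decreasing_by
  rename_i hmem
  exact pvFilterLenLt (fun a h => by simp at h ⊢; omega) (x, y) hmem
    (by simp) (by simp)

def tilt_n (rounded : List (Int × Int)) (cube : List (Int × Int)) (h_ : Int) : List (Int × Int) :=
  rounded.foldl (fun tlt p =>
    let s := tiltStop cube h_ p.1 p.2          -- after the first while loop, y = s; then y -= 1
    let t := tiltSettle tlt p.1 (s - 1)        -- second while loop
    PySem.Set.add tlt (p.1, t)) PySem.Set.empty

-- ===== PORT B =====
-- cols.setdefault(cx, []).append(cy)  ==  cols[cx] = cols.get(cx, []) + [cy]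
def tiltCols (cube : List (Int × Int)) : PySem.Dict Int (List Int) :=
  cube.foldl (fun d p => d.modify p.1 [] (· ++ [p.2])) PySem.Dict.empty

-- the 'while k in parent: path.append(k); k = parent[k]' loop of Source B, returning (k, path);
-- the fuel only makes it total — the caller passes parent.size + 1, which the invariant proved
-- below shows is never exhausted (the chain visits distinct keys of parent)
def ufFind (parent : PySem.Dict (Int × Int) (Int × Int)) (k : Int × Int)
    (path : List (Int × Int)) : Nat → (Int × Int) × List (Int × Int)
  | 0 => (k, path)
  | fuel + 1 =>
    match parent.get? k with
    | none => (k, path)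
    | some v => ufFind parent v (path ++ [k]) fuel

def tilt_n_alt (rounded : List (Int × Int)) (cube : List (Int × Int)) (h_ : Int) : List (Int × Int) :=
  let cols := tiltCols cube
  (rounded.foldl (fun st p =>
      -- s = min([c for c in cols.get(x, []) if c >= y] + [max(y, h + 1)]);
      -- the argument of min is nonempty, so the .getD 0 default is never used
      let cand := (cols.getD p.1 []).filter (fun c => decide (p.2 ≤ c)) ++ [max p.2 (h_ + 1)]
      let s := (PySem.List.min? cand (fun v => v)).getD 0
      let fr := ufFind st.2 (p.1, s - 1) [] (st.2.size + 1)
      let parent' := fr.2.foldl (fun d q => d.insert q fr.1) st.2   -- for p in path: parent[p] = k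
      let t := fr.1.2
      (PySem.Set.add st.1 (p.1, t), parent'.insert (p.1, t) (p.1, t - 1)))
    (PySem.Set.empty, PySem.Dict.empty)).1

-- ===== PRECONDITION & SPEC =====
def Spec_tilt_n (rounded : List (Int × Int)) (cube : List (Int × Int)) (h_ : Int) (out : List (Int × Int)) : Prop := out = tilt_n_alt rounded cube h_
instance (rounded : List (Int × Int)) (cube : List (Int × Int)) (h_ : Int) (out : List (Int × Int)) : Decidable (Spec_tilt_n rounded cube h_ out) := by unfold Spec_tilt_n; infer_instance

-- ===== CLAIM (what is proved, stated in full; the proofs are below) =====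
def Claim_equal_tilt_n : Prop := ∀ (rounded : List (Int × Int)) (cube : List (Int × Int)) (h_ : Int), Dom_tilt_n rounded cube h_ → Spec_tilt_n rounded cube h_ (tilt_n rounded cube h_)

-- ===== LEMMAS AND PROOFS =====

-- the list of cube rows in column x
def colOf (cube : List (Int × Int)) (x : Int) : List Int :=
  (cube.filter (fun p => p.1 == x)).map (·.2)

theorem mem_colOf (cube : List (Int × Int)) (x c : Int) :
    c ∈ colOf cube x ↔ (x, c) ∈ cube := by
  simp only [colOf, List.mem_map, List.mem_filter]
  constructor
  · rintro ⟨⟨a, b⟩, ⟨hm, he⟩, rfl⟩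
    simp at he; subst he; exact hm
  · intro hm; exact ⟨(x, c), ⟨hm, by simp⟩, rfl⟩

theorem cols_getD (cube : List (Int × Int)) (x : Int) :
    (tiltCols cube).getD x [] = colOf cube x := by
  unfold tiltCols colOf
  rw [PySem.Dict.getD_foldl_modify_append]
  simp

theorem min_getD_eq {cand : List Int} {y : Int} (hy : y ∈ cand)
    (hall : ∀ c ∈ cand, y ≤ c) :
    (PySem.List.min? cand (fun v => v)).getD 0 = y := by
  obtain ⟨m, hm⟩ : ∃ m, PySem.List.min? cand (fun v => v) = some m := by
    cases hc : PySem.List.min? cand (fun v => v) with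
    | none => exact absurd ((PySem.List.min?_eq_none_iff _ _).mp hc) (by rintro rfl; simp at hy)
    | some m => exact ⟨m, rfl⟩
  rw [hm]
  have h1 : y ≤ m := hall m (PySem.List.min?_mem hm)
  have h2 : m ≤ y := PySem.List.min?_isMin hm y hy
  simp; omega

theorem stop_eq (cube : List (Int × Int)) (h_ x y : Int) :
    tiltStop cube h_ x y =
      (PySem.List.min? ((colOf cube x).filter (fun c => decide (y ≤ c)) ++ [max y (h_ + 1)])
        (fun v => v)).getD 0 := by
  fun_induction tiltStop cube h_ x y with
  | case1 y hcond ih =>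
    obtain ⟨hnc, hyh⟩ := hcond
    have h1 : (colOf cube x).filter (fun c => decide (y ≤ c)) =
        (colOf cube x).filter (fun c => decide (y + 1 ≤ c)) := by
      apply List.filter_congr
      intro c hc
      have : c ≠ y := by
        rintro rfl
        exact hnc ((mem_colOf cube x c).mp hc)
      simp; omega
    have h2 : max y (h_ + 1) = max (y + 1) (h_ + 1) := by omega
    rw [ih, h1, h2]
  | case2 y hcond =>
    rw [Classical.not_and_iff_not_or_not, Classical.not_not] at hcond
    symm
    apply min_getD_eq
    · rcases hcond with hmem | hgt
      · exact List.mem_append_left _ (List.mem_filter.mpr ⟨(mem_colOf cube x y).mpr hmem, by simp⟩)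
      · have : max y (h_ + 1) = y := by omega
        rw [← this]
        exact List.mem_append_right _ (by simp)
    · intro c hc
      rcases List.mem_append.mp hc with hcf | hcl
      · exact of_decide_eq_true (List.mem_filter.mp hcf).2
      · simp at hcl; omega

theorem settle_props (tlt : List (Int × Int)) (x y : Int) :
    (x, tiltSettle tlt x y) ∉ tlt ∧ tiltSettle tlt x y ≤ y ∧
      ∀ m, tiltSettle tlt x y < m → m ≤ y → (x, m) ∈ tlt := by
  fun_induction tiltSettle tlt x y with
  | case1 y hmem ih =>
    obtain ⟨hfree, hle, hrun⟩ := ih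
    refine ⟨hfree, by omega, ?_⟩
    intro m h1 h2
    rcases eq_or_lt_of_le h2 with rfl | hlt
    · exact hmem
    · exact hrun m h1 (by omega)
  | case2 y hmem =>
    exact ⟨hmem, le_refl _, fun m h1 h2 => absurd h1 (by omega)⟩

-- the state invariant linking A's settled set to B's parent dictionary
def InvPC (tlt : List (Int × Int)) (parent : PySem.Dict (Int × Int) (Int × Int)) : Prop :=
  parent.keys.Nodup ∧
  (∀ q : Int × Int, parent.contains q = true ↔ q ∈ tlt) ∧
  (∀ k v : Int × Int, parent.get? k = some v →
    v.1 = k.1 ∧ v.2 < k.2 ∧ ∀ m, v.2 < m → m < k.2 → (k.1, m) ∈ tlt)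

theorem find_spec (tlt : List (Int × Int)) (parent : PySem.Dict (Int × Int) (Int × Int))
    (x t : Int) (hinv : InvPC tlt parent) (hfree : (x, t) ∉ tlt) :
    ∀ (fuel : Nat) (y₀ : Int) (path : List (Int × Int)),
      t ≤ y₀ → (∀ m, t < m → m ≤ y₀ → (x, m) ∈ tlt) → (y₀ - t).toNat < fuel →
      ∃ chain, ufFind parent (x, y₀) path fuel = ((x, t), path ++ chain) ∧
        ∀ q ∈ chain, q.1 = x ∧ t < q.2 ∧ q.2 ≤ y₀ ∧ parent.contains q = true := by
  obtain ⟨hnd, hK, hC⟩ := hinv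
  intro fuel
  induction fuel with
  | zero => intro y₀ path _ _ hf; exact absurd hf (by omega)
  | succ f ih =>
    intro y₀ path hle hrun hf
    cases hg : parent.get? (x, y₀) with
    | none =>
      have hnot : (x, y₀) ∉ tlt := by
        intro hm
        have hc := (hK (x, y₀)).mpr hm
        rw [PySem.Dict.contains_eq_isSome_get?, hg] at hc
        simp at hc
      have hty : t = y₀ := by
        by_contra hne
        exact hnot (hrun y₀ (lt_of_le_of_ne hle hne) le_rfl)
      subst hty
      exact ⟨[], by simp [ufFind, hg], by simp⟩
    | some v =>
      have hmem : (x, y₀) ∈ tlt := by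
        apply (hK (x, y₀)).mp
        rw [PySem.Dict.contains_eq_isSome_get?, hg]; rfl
      have hty : t < y₀ := by
        rcases lt_or_eq_of_le hle with h | h
        · exact h
        · exact absurd (h ▸ hmem) hfree
      obtain ⟨hv1, hv2, hv3⟩ := hC _ _ hg
      have htv : t ≤ v.2 := by
        by_contra hlt
        push Not at hlt
        exact hfree (by simpa using hv3 t hlt hty)
      have hvpair : v = (x, v.2) := by
        obtain ⟨a, b⟩ := v; simp at hv1 ⊢; exact hv1
      obtain ⟨chain, hch, hchprops⟩ := ih v.2 (path ++ [(x, y₀)]) htv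
        (fun m hm1 hm2 => hrun m hm1 (by omega)) (by omega)
      refine ⟨(x, y₀) :: chain, ?_, ?_⟩
      · have : ufFind parent (x, y₀) path (f + 1) = ufFind parent v (path ++ [(x, y₀)]) f := by
          simp [ufFind, hg]
        rw [this, hvpair, hch, List.append_assoc]
        rfl
      · intro q hq
        rcases List.mem_cons.mp hq with rfl | hq'
        · exact ⟨rfl, hty, le_refl _, by rw [PySem.Dict.contains_eq_isSome_get?, hg]; rfl⟩
        · obtain ⟨h1, h2, h3, h4⟩ := hchprops q hq'
          exact ⟨h1, h2, by omega, h4⟩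

theorem run_le_size (tlt : List (Int × Int)) (parent : PySem.Dict (Int × Int) (Int × Int))
    (x t y₀ : Int) (hinv : InvPC tlt parent) (hle : t ≤ y₀)
    (hrun : ∀ m, t < m → m ≤ y₀ → (x, m) ∈ tlt) :
    (y₀ - t).toNat ≤ parent.size := by
  obtain ⟨hnd, hK, hC⟩ := hinv
  have hsub : ((List.range (y₀ - t).toNat).map (fun (i : Nat) => (x, t + 1 + (i : Int)))) ⊆ parent.keys := by
    intro q hq
    simp only [List.mem_map, List.mem_range] at hq
    obtain ⟨i, hi, rfl⟩ := hq
    apply (PySem.Dict.contains_iff_mem_keys _ _).mp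
    apply (hK _).mpr
    apply hrun <;> omega
  have hnodL : ((List.range (y₀ - t).toNat).map (fun (i : Nat) => (x, t + 1 + (i : Int)))).Nodup := by
    apply List.Nodup.map _ (List.nodup_range)
    intro a b hab
    simp only [Prod.mk.injEq] at hab
    omega
  have hlen := (List.subperm_of_subset hnodL hsub).length_le
  simp only [List.length_map, List.length_range] at hlen
  have hkeys : parent.keys.length = parent.size := by
    simp [PySem.Dict.keys, PySem.Dict.size]
  omega

theorem foldl_insert_get? {κ ν : Type} [BEq κ] [LawfulBEq κ] [DecidableEq κ] (l : List κ) (v : ν) :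
    ∀ (d : PySem.Dict κ ν) (k : κ),
      (l.foldl (fun d q => d.insert q v) d).get? k = if k ∈ l then some v else d.get? k := by
  induction l with
  | nil => intro d k; simp
  | cons a l ih =>
    intro d k
    simp only [List.foldl_cons]
    rw [ih, PySem.Dict.get?_insert]
    by_cases hk : k ∈ l
    · simp [hk]
    · by_cases hka : k = a <;> simp [hk, hka]

theorem step_inv (tlt : List (Int × Int)) (parent : PySem.Dict (Int × Int) (Int × Int))
    (x t y₀ : Int) (chain : List (Int × Int)) (hinv : InvPC tlt parent)
    (hrun : ∀ m, t < m → m ≤ y₀ → (x, m) ∈ tlt)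
    (hchain : ∀ q ∈ chain, q.1 = x ∧ t < q.2 ∧ q.2 ≤ y₀ ∧ parent.contains q = true) :
    InvPC (PySem.Set.add tlt (x, t))
      ((chain.foldl (fun d q => d.insert q (x, t)) parent).insert (x, t) (x, t - 1)) := by
  obtain ⟨hnd, hK, hC⟩ := hinv
  have hget : ∀ k : Int × Int,
      ((chain.foldl (fun d q => d.insert q (x, t)) parent).insert (x, t) (x, t - 1)).get? k =
        if k = (x, t) then some (x, t - 1)
        else if k ∈ chain then some (x, t) else parent.get? k := by
    intro k
    rw [PySem.Dict.get?_insert, foldl_insert_get?]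
  refine ⟨?_, ?_, ?_⟩
  · exact PySem.Dict.nodup_keys_insert _ _ _
      (PySem.Dict.nodup_keys_foldl_insert chain (fun _ _ => (x, t)) parent hnd)
  · intro q
    rw [PySem.Dict.contains_eq_isSome_get?, hget, PySem.Set.mem_add]
    by_cases hq1 : q = (x, t)
    · simp [hq1]
    · by_cases hq2 : q ∈ chain
      · obtain ⟨-, -, -, hcq⟩ := hchain q hq2
        simp only [hq1, if_false, hq2, if_true]
        constructor
        · intro _; exact Or.inl ((hK q).mp hcq)
        · intro _; rfl
      · simp only [hq1, if_false, hq2, if_false]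
        rw [← PySem.Dict.contains_eq_isSome_get?]
        rw [hK q]
        constructor
        · exact Or.inl
        · rintro (h | h)
          · exact h
          · exact h.elim
  · intro k v hkv
    rw [hget] at hkv
    by_cases hq1 : k = (x, t)
    · rw [if_pos hq1] at hkv
      subst hq1
      obtain rfl : v = (x, t - 1) := by simpa using hkv.symm
      exact ⟨rfl, by omega, fun m h1 h2 => by omega⟩
    · rw [if_neg hq1] at hkv
      by_cases hq2 : k ∈ chain
      · rw [if_pos hq2] at hkv
        obtain rfl : v = (x, t) := by simpa using hkv.symm
        obtain ⟨hk1, hk2, hk3, -⟩ := hchain k hq2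
        refine ⟨hk1.symm, hk2, ?_⟩
        intro m h1 h2
        rw [hk1, PySem.Set.mem_add]
        exact Or.inl (hrun m h1 (by omega))
      · rw [if_neg hq2] at hkv
        obtain ⟨h1, h2, h3⟩ := hC k v hkv
        exact ⟨h1, h2, fun m hm1 hm2 => (PySem.Set.mem_add ..).mpr (Or.inl (h3 m hm1 hm2))⟩

theorem loop_eq (cube : List (Int × Int)) (h_ : Int) :
    ∀ (l tlt : List (Int × Int)) (parent : PySem.Dict (Int × Int) (Int × Int)),
      InvPC tlt parent →
      l.foldl (fun tlt p =>
          let s := tiltStop cube h_ p.1 p.2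
          let t := tiltSettle tlt p.1 (s - 1)
          PySem.Set.add tlt (p.1, t)) tlt =
      (l.foldl (fun st p =>
          let cand := ((tiltCols cube).getD p.1 []).filter (fun c => decide (p.2 ≤ c)) ++ [max p.2 (h_ + 1)]
          let s := (PySem.List.min? cand (fun v => v)).getD 0
          let fr := ufFind st.2 (p.1, s - 1) [] (st.2.size + 1)
          let parent' := fr.2.foldl (fun d q => d.insert q fr.1) st.2
          let t := fr.1.2
          (PySem.Set.add st.1 (p.1, t), parent'.insert (p.1, t) (p.1, t - 1))) (tlt, parent)).1 := by
  intro l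
  induction l with
  | nil => intro tlt parent _; rfl
  | cons p l ih =>
    intro tlt parent hinv
    rw [List.foldl_cons, List.foldl_cons]
    obtain ⟨hfree, hle, hrun⟩ := settle_props tlt p.1 (tiltStop cube h_ p.1 p.2 - 1)
    have hsB : (PySem.List.min? (((tiltCols cube).getD p.1 []).filter (fun c => decide (p.2 ≤ c))
        ++ [max p.2 (h_ + 1)]) (fun v => v)).getD 0 = tiltStop cube h_ p.1 p.2 := by
      rw [cols_getD]
      exact (stop_eq cube h_ p.1 p.2).symm
    have hfuel : (tiltStop cube h_ p.1 p.2 - 1 - tiltSettle tlt p.1 (tiltStop cube h_ p.1 p.2 - 1)).toNat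
        < parent.size + 1 :=
      Nat.lt_succ_of_le (run_le_size tlt parent p.1 _ _ hinv hle hrun)
    obtain ⟨chain, hfind, hprops⟩ := find_spec tlt parent p.1 _ hinv hfree
      (parent.size + 1) (tiltStop cube h_ p.1 p.2 - 1) [] hle hrun hfuel
    rw [List.nil_append] at hfind
    have hB : (let cand := ((tiltCols cube).getD p.1 []).filter (fun c => decide (p.2 ≤ c)) ++ [max p.2 (h_ + 1)]
          let s := (PySem.List.min? cand (fun v => v)).getD 0
          let fr := ufFind (tlt, parent).2 (p.1, s - 1) [] ((tlt, parent).2.size + 1)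
          let parent' := fr.2.foldl (fun d q => d.insert q fr.1) (tlt, parent).2
          let t := fr.1.2
          (PySem.Set.add (tlt, parent).1 (p.1, t), parent'.insert (p.1, t) (p.1, t - 1)))
        = (PySem.Set.add tlt (p.1, tiltSettle tlt p.1 (tiltStop cube h_ p.1 p.2 - 1)),
           (chain.foldl (fun d q => d.insert q (p.1, tiltSettle tlt p.1 (tiltStop cube h_ p.1 p.2 - 1))) parent).insert
             (p.1, tiltSettle tlt p.1 (tiltStop cube h_ p.1 p.2 - 1))
             (p.1, tiltSettle tlt p.1 (tiltStop cube h_ p.1 p.2 - 1) - 1)) := by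
      simp only [hsB, hfind]
    rw [hB]
    exact ih _ _ (step_inv tlt parent p.1 _ _ chain hinv hrun hprops)


-- ===== VERDICT (by name: the statement is the Claim_ definition above) =====
theorem tilt_n_spec : Claim_equal_tilt_n := by
  intro rounded cube h_ _
  unfold Spec_tilt_n tilt_n tilt_n_alt
  exact loop_eq cube h_ rounded PySem.Set.empty PySem.Dict.empty
    ⟨by simp, by simp [PySem.Set.empty], fun k v h => by simp at h⟩
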